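-- pv_equiv track=rewrite | github.com/alexandraback/datacollection | solutions_5738606668808192_1/Python/bydooweedoo/C.py | findDivs
-- ===== SOURCE A (Python) =====
-- def findDiv(number, primes):
--     for prime in primes:
--         if number % prime == 0:
--             return prime
--     # for div in range(primes[-1], int(math.sqrt(number)) + 1):
--     #     if number % div == 0:
--     #         return div
--     return None
--
-- def findDivs(numbers, primes):
--     divs = []
--     for number in numbers:
--         div = findDiv(number, primes)
--         if div is None:
--             return None
--         else:
--             divs.append(str(div))
--     return divs
-- ===== SOURCE B (Python) =====
-- def findDivs(numbers, primes):
--     # Transposed traversal: outer loop over primes, inner over numbers; each index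
--     # keeps the first prime (in primes order) that divides its number, because a
--     # slot once filled is never overwritten.
--     div = {}
--     for p in primes:
--         for i, n in enumerate(numbers):
--             if i not in div and n % p == 0:
--                 div[i] = p
--     if any(i not in div for i in range(len(numbers))):
--         return None
--     return [str(div[i]) for i in range(len(numbers))]
-- ===== Notes on version B (the rewrite author's own statement) =====
-- stated objective: alternative
-- what changed: Transposes the traversal: instead of scanning primes per number with an early return, B loops primes-major, filling a dict slot per index with the first prime that divides it (never overwriting), then validates all slots filled and stringifies; equivalent because a slot keeps exactly the first dividing prime in primes order.
import Mathlib
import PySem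

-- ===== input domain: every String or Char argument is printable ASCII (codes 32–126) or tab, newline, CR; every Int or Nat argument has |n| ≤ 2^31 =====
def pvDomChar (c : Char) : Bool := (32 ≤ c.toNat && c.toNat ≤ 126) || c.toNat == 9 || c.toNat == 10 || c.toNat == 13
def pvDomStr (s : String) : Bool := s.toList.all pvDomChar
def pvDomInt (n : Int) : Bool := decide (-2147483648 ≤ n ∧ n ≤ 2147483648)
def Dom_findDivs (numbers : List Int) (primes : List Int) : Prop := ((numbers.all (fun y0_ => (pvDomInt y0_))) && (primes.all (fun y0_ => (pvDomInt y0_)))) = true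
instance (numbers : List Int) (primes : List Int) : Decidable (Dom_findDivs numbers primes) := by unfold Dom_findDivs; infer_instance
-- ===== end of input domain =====

-- B transposes A's traversal (primes-major slot-filling dict, then validate + stringify)
-- instead of A's number-major scan with early return; same cost, different structure.


-- ===== PORT A =====
-- helper findDiv: scan primes, return first prime dividing number
def findDiv (number : Int) (primes : List Int) : Option Int :=
  match primes with
  | [] => none
  | p :: rest => if PySem.Int.mod number p == 0 then some p else findDiv number rest

-- the loop over numbers with accumulator divs and early return None
def findDivsGo (primes : List Int) (numbers : List Int) (divs : List String) : Option (List String) :=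
  match numbers with
  | [] => some divs
  | n :: rest =>
    match findDiv n primes with
    | none => none
    | some d => findDivsGo primes rest (divs ++ [PySem.Int.toStr d])

def findDivs (numbers : List Int) (primes : List Int) : Option (List String) :=
  findDivsGo primes numbers []

-- ===== PORT B =====
-- inner loop: for i, n in enumerate(numbers): if i not in div and n % p == 0: div[i] = p
def fillSlots (numbers : List Int) (p : Int) (d : PySem.Dict Int Int) : PySem.Dict Int Int :=
  (PySem.List.enumerate numbers).foldl
    (fun d q => if !(d.contains q.1) && PySem.Int.mod q.2 p == 0 then d.insert q.1 p else d) d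

def findDivs_alt (numbers : List Int) (primes : List Int) : Option (List String) :=
  let d := primes.foldl (fun d p => fillSlots numbers p d) PySem.Dict.empty
  if (PySem.List.pyRange 0 (numbers.length : Int) 1).any (fun i => !(d.contains i)) then none
  else (PySem.List.pyRange 0 (numbers.length : Int) 1).mapM
        (fun i => (d.get? i).map PySem.Int.toStr)

-- ===== PRECONDITION & SPEC =====
-- Pre_ excludes exactly the inputs where the Python raises ZeroDivisionError: some number
-- reaches a 0 in primes before any prime dividing it (both A and B raise there).
def Pre_findDivs (numbers : List Int) (primes : List Int) : Prop :=
  ∀ n ∈ numbers, primes.find? (fun p => decide (p = 0) || decide (PySem.Int.mod n p = 0)) ≠ some 0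
instance (numbers : List Int) (primes : List Int) : Decidable (Pre_findDivs numbers primes) := by unfold Pre_findDivs; infer_instance
def pvWitness_findDivs : List Int × List Int := ([12, 35], [2, 3, 5, 7])

def Spec_findDivs (numbers : List Int) (primes : List Int) (out : Option (List String)) : Prop := out = findDivs_alt numbers primes
instance (numbers : List Int) (primes : List Int) (out : Option (List String)) : Decidable (Spec_findDivs numbers primes out) := by unfold Spec_findDivs; infer_instance

-- ===== CLAIM (what is proved, stated in full; the proofs are below) =====
def Claim_equal_findDivs : Prop := ∀ (numbers : List Int) (primes : List Int), Dom_findDivs numbers primes → Pre_findDivs numbers primes → Spec_findDivs numbers primes (findDivs numbers primes)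

-- ===== LEMMAS AND PROOFS =====

theorem findDiv_eq_find? (number : Int) (primes : List Int) :
    findDiv number primes = primes.find? (fun p => PySem.Int.mod number p == 0) := by
  induction primes with
  | nil => rfl
  | cons p rest ih =>
    simp only [findDiv, List.find?]
    split_ifs with h
    · simp [h]
    · simp only [Bool.not_eq_true] at h
      simp [h, ih]

theorem findDivsGo_eq (primes : List Int) (numbers : List Int) (acc : List String) :
    findDivsGo primes numbers acc =
      (numbers.mapM (fun n => (primes.find? (fun p => PySem.Int.mod n p == 0)).map PySem.Int.toStr)).map
        (fun l => acc ++ l) := by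
  induction numbers generalizing acc with
  | nil => simp [findDivsGo]
  | cons n rest ih =>
    simp only [findDivsGo, findDiv_eq_find?, List.mapM_cons]
    cases h : primes.find? (fun p => PySem.Int.mod n p == 0) with
    | none => simp [h]
    | some d =>
      simp only [Option.map_some]
      rw [ih]
      cases rest.mapM (fun n => (primes.find? (fun p => PySem.Int.mod n p == 0)).map PySem.Int.toStr) <;> simp

-- what one inner pass (one prime) does to one slot, for any nodup-keyed pair list
theorem inner_get? (L : List (Int × Int)) (hL : (L.map (·.1)).Nodup) (p : Int)
    (d : PySem.Dict Int Int) (j : Int) :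
    ((L.foldl (fun d q => if !(d.contains q.1) && PySem.Int.mod q.2 p == 0 then d.insert q.1 p else d) d).get? j)
      = if (d.get? j).isSome then d.get? j
        else match L.find? (fun q => q.1 == j) with
          | some q => if PySem.Int.mod q.2 p == 0 then some p else none
          | none => none := by
  induction L generalizing d with
  | nil =>
    simp only [List.foldl_nil, List.find?_nil]
    cases d.get? j <;> simp
  | cons q L ih =>
    simp only [List.map_cons, List.nodup_cons] at hL
    obtain ⟨hq, hnd⟩ := hL
    simp only [List.foldl_cons]
    by_cases hj : q.1 = j
    · subst hj
      rw [List.find?_cons_of_pos (by simp)]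
      rw [PySem.Dict.contains_eq_isSome_get?]
      cases hd : d.get? q.1 with
      | some v =>
        simp only [Option.isSome_some, Bool.not_true, Bool.false_and,
          Bool.false_eq_true, if_false]
        rw [ih hnd]
        simp [hd]
      | none =>
        simp only [Option.isSome_none, Bool.not_false, Bool.true_and]
        by_cases hm : (PySem.Int.mod q.2 p == 0) = true
        · rw [if_pos hm, ih hnd]
          simp [PySem.Dict.get?_insert_self, hm, hd]
        · rw [if_neg hm, ih hnd]
          simp only [hd, Option.isSome_none, Bool.false_eq_true, if_false]
          have hfn : L.find? (fun r => r.1 == q.1) = none := by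
            rw [List.find?_eq_none]
            intro r hr
            simp only [beq_iff_eq]
            intro he
            exact hq (he ▸ List.mem_map_of_mem hr)
          rw [hfn]
          simp [hm]
    · rw [List.find?_cons_of_neg (by simpa using fun h => hj h)]
      by_cases hc : (!(d.contains q.1) && PySem.Int.mod q.2 p == 0) = true
      · rw [if_pos hc, ih hnd, PySem.Dict.get?_insert_of_ne d p (Ne.symm hj)]
      · rw [if_neg hc, ih hnd]

-- enumerate's key list is nodup
theorem enumerate_fst_nodup (numbers : List Int) :
    ((PySem.List.enumerate numbers 0).map (·.1)).Nodup := by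
  rw [PySem.List.map_fst_enumerate]
  exact PySem.List.nodup_pyRange_one 0 (0 + numbers.length)

-- find? over enumerate at a valid index
theorem enumerate_find? (numbers : List Int) (s : Int) (k : Nat) (hk : k < numbers.length) :
    (PySem.List.enumerate numbers s).find? (fun q => q.1 == s + (k : Int)) = some (s + k, numbers[k]) := by
  induction numbers generalizing s k with
  | nil => simp at hk
  | cons n rest ih =>
    rw [PySem.List.enumerate_cons]
    cases k with
    | zero => simp
    | succ m =>
      have hm : m < rest.length := by simpa using hk
      have hb : ((s, n).1 == s + ((m + 1 : Nat) : Int)) = false := by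
        simp; omega
      rw [List.find?_cons_of_neg (by simp; omega)]
      have := ih (s + 1) m hm
      have harg : s + 1 + (m : Int) = s + ((m + 1 : Nat) : Int) := by push_cast; ring
      rw [harg] at this
      simpa using this

-- outer fold: each slot holds the first dividing prime among processed primes
theorem outer_get? (numbers : List Int) (ps : List Int) (d : PySem.Dict Int Int)
    (k : Nat) (hk : k < numbers.length) :
    ((ps.foldl (fun d p => fillSlots numbers p d) d).get? (k : Int))
      = (d.get? (k : Int)).or (ps.find? (fun p => PySem.Int.mod numbers[k] p == 0)) := by
  induction ps generalizing d with
  | nil => simp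
  | cons p ps ih =>
    rw [List.foldl_cons, ih]
    have hfill : (fillSlots numbers p d).get? (k : Int)
        = if (d.get? (k : Int)).isSome then d.get? (k : Int)
          else if PySem.Int.mod numbers[k] p == 0 then some p else none := by
      unfold fillSlots
      rw [inner_get? _ (enumerate_fst_nodup numbers) p d (k : Int)]
      have := enumerate_find? numbers 0 k hk
      simp only [zero_add] at this
      rw [this]
    rw [hfill, List.find?_cons]
    cases hd : d.get? (k : Int) with
    | some v => simp [hd]
    | none =>
      simp only [hd, Option.isSome_none, Bool.false_eq_true, if_false, Option.none_or]
      by_cases hm : PySem.Int.mod numbers[k] p == 0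
      · simp [hm]
      · simp only [hm, Bool.false_eq_true, if_false]
        simp

-- mapM over List.range matched against mapM over the list itself
theorem mapM_range_eq {α β : Type} (xs : List α) (f : α → Option β) (F : Nat → Option β)
    (h : ∀ k (hk : k < xs.length), F k = f xs[k]) :
    (List.range xs.length).mapM F = xs.mapM f := by
  induction xs generalizing F with
  | nil => simp
  | cons x rest ih =>
    rw [List.length_cons, List.range_succ_eq_map, List.mapM_cons, List.mapM_cons, List.mapM_map]
    have h0 : F 0 = f x := h 0 (by simp)
    rw [h0, ih (F ∘ Nat.succ) (fun k hk => by
      simpa [Function.comp, Nat.succ_eq_add_one] using h (k + 1) (by simpa using hk))]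

theorem mapM_eq_none_of_mem {α β : Type} (l : List α) (F : α → Option β)
    (x : α) (hx : x ∈ l) (hF : F x = none) : l.mapM F = none := by
  induction l with
  | nil => simp at hx
  | cons y l ih =>
    rw [List.mapM_cons]
    rcases List.mem_cons.mp hx with hx | hx
    · subst hx
      simp [hF]
    · cases hy : F y with
      | none => simp [hy]
      | some v => simp [hy, ih hx]

-- ===== VERDICT (by name: the statement is the Claim_ definition above) =====
theorem findDivs_spec : Claim_equal_findDivs := by
  intro numbers primes _ _
  unfold Spec_findDivs findDivs findDivs_alt
  rw [findDivsGo_eq]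
  simp only [List.nil_append, Option.map_id']
  have hget : ∀ k (hk : k < numbers.length),
      ((primes.foldl (fun d p => fillSlots numbers p d) PySem.Dict.empty).get? (k : Int))
        = primes.find? (fun p => PySem.Int.mod numbers[k] p == 0) := by
    intro k hk
    rw [outer_get? numbers primes PySem.Dict.empty k hk]
    rfl
  set d := primes.foldl (fun d p => fillSlots numbers p d) PySem.Dict.empty with hd
  by_cases hany : (PySem.List.pyRange 0 (numbers.length : Int) 1).any (fun i => !(d.contains i)) = true
  · rw [if_pos hany]
    rw [List.any_eq_true] at hany
    obtain ⟨i, hi, hni⟩ := hany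
    rw [PySem.List.mem_pyRange_one] at hi
    obtain ⟨h0, hlen⟩ := hi
    have hk : i.toNat < numbers.length := by omega
    have hieq : ((i.toNat : Nat) : Int) = i := by omega
    have : d.get? i = none := by
      rw [PySem.Dict.contains_eq_isSome_get?] at hni
      cases h : d.get? i <;> simp [h] at hni ⊢
    have hfind : primes.find? (fun p => PySem.Int.mod numbers[i.toNat] p == 0) = none := by
      rw [← hget i.toNat hk, hieq, this]
    exact mapM_eq_none_of_mem numbers
      (fun n => (primes.find? (fun p => PySem.Int.mod n p == 0)).map PySem.Int.toStr)
      numbers[i.toNat] (List.getElem_mem hk) (by simp [hfind])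
  · rw [if_neg hany]
    rw [PySem.List.pyRange_zero_nat, List.mapM_map]
    exact (mapM_range_eq numbers _
      ((fun i => (d.get? i).map PySem.Int.toStr) ∘ fun k : Nat => (k : Int))
      (fun k hk => by simp only [Function.comp]; rw [hget k hk])).symm
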